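-- pv_equiv track=rewrite | github.com/jiayiliu1234/-2024fall-cs101 | 作业/9.7/提取实体.py | new_func
-- ===== SOURCE A (Python) =====
-- def new_func(a):
--     count = 0
--     pre_has_hash = False
--     for i in a:
--         if i[:3] == '###':
--             if pre_has_hash == False:
--                 count += 1
--             pre_has_hash = True
--         else:
--             pre_has_hash = False
--     return count
-- ===== SOURCE B (Python) =====
-- def new_func(a):
--     runs = []  # run-length encoding: [key, length] for maximal consecutive groups
--     for x in a:
--         k = x[:3] == '###'
--         if runs and runs[-1][0] == k:
--             runs[-1][1] += 1
--         else:
--             runs.append([k, 1])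
--     return sum(1 for k, _ in runs if k)
-- ===== Notes on version B (the rewrite author's own statement) =====
-- stated objective: alternative
-- what changed: Instead of maintaining a previous-match transition flag, B first builds a run-length encoding of the list grouped by the '###'-prefix key and then counts the runs whose key is True (grouping-then-counting decomposition).
import Mathlib
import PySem

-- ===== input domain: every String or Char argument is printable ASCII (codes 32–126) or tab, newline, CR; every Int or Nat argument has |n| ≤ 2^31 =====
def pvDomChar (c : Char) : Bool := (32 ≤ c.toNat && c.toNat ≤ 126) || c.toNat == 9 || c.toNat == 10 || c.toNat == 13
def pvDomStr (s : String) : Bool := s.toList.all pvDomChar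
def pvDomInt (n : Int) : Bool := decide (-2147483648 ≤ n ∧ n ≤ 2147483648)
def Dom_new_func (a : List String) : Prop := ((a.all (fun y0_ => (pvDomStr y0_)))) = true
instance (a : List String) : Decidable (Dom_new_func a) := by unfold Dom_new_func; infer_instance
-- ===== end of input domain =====

-- B builds a run-length encoding grouped by the '###'-prefix key, then counts the True-keyed
-- runs, instead of A's per-element transition flag (alternative decomposition, same cost).

-- ===== PORT A =====
-- i[:3] == '###' ported exactly as PySem.List.slice on the character list
def new_func (a : List String) : Int :=
  (a.foldl (fun (st : Int × Bool) i =>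
      if PySem.List.slice i.toList none (some 3) == ['#','#','#'] then
        (if st.2 = false then st.1 + 1 else st.1, true)
      else (st.1, false))
    (0, false)).1

-- ===== PORT B =====
-- the loop body of Source B: extend or start the last run
def pvStepRuns (runs : List (Bool × Int)) (x : String) : List (Bool × Int) :=
  let k := PySem.List.slice x.toList none (some 3) == ['#','#','#']
  match runs.getLast? with
  | some (kl, c) => if kl == k then runs.dropLast ++ [(kl, c + 1)] else runs ++ [(k, 1)]
  | none => runs ++ [(k, 1)]

def new_func_alt (a : List String) : Int :=
  let runs := a.foldl pvStepRuns []
  ((runs.filter (fun p => p.1)).length : Int)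

-- ===== PRECONDITION & SPEC =====
def Spec_new_func (a : List String) (out : Int) : Prop := out = new_func_alt a
instance (a : List String) (out : Int) : Decidable (Spec_new_func a out) := by unfold Spec_new_func; infer_instance

-- ===== CLAIM (what is proved, stated in full; the proofs are below) =====
def Claim_equal_new_func : Prop := ∀ (a : List String), Dom_new_func a → Spec_new_func a (new_func a)

-- ===== LEMMAS AND PROOFS =====
-- the key of the last run, False on the empty run list (matches A's initial flag)
def pvLastKey (runs : List (Bool × Int)) : Bool :=
  match runs.getLast? with
  | some (k, _) => k
  | none => false

theorem pv_key (a : List String) (runs : List (Bool × Int)) :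
    (a.foldl (fun (st : Int × Bool) i =>
        if PySem.List.slice i.toList none (some 3) == ['#','#','#'] then
          (if st.2 = false then st.1 + 1 else st.1, true)
        else (st.1, false))
      ((((runs.filter (fun p => p.1)).length : Int)), pvLastKey runs)).1
    = (((a.foldl pvStepRuns runs).filter (fun p => p.1)).length : Int) := by
  induction a generalizing runs with
  | nil => rfl
  | cons x xs ih =>
    simp only [List.foldl_cons]
    have hstep :
        (if PySem.List.slice x.toList none (some 3) == ['#','#','#'] then
            (if pvLastKey runs = false then ((runs.filter (fun p => p.1)).length : Int) + 1
             else ((runs.filter (fun p => p.1)).length : Int), true)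
          else (((runs.filter (fun p => p.1)).length : Int), false))
        = ((((pvStepRuns runs x).filter (fun p => p.1)).length : Int),
           pvLastKey (pvStepRuns runs x)) := by
      unfold pvStepRuns pvLastKey
      cases hL : runs.getLast? with
      | none =>
        have hr : runs = [] := List.getLast?_eq_none_iff.mp hL
        subst hr
        cases hk : PySem.List.slice x.toList none (some 3) == ['#','#','#'] <;> simp [hk]
      | some p =>
        obtain ⟨kl, c⟩ := p
        have hne : runs ≠ [] := by
          intro h; subst h; simp at hL
        have hlast : runs.getLast hne = (kl, c) := by
          have h2 := List.getLast?_eq_some_getLast hne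
          rw [hL] at h2; exact (Option.some_inj.mp h2).symm
        have hdecomp : runs.dropLast ++ [(kl, c)] = runs := by
          rw [← hlast]; exact List.dropLast_append_getLast hne
        rw [← hdecomp]
        cases hk : PySem.List.slice x.toList none (some 3) == ['#','#','#'] <;>
          cases hkl : kl <;>
            simp [hk, List.filter_append, List.getLast?_concat, List.dropLast_concat]
    rw [hstep, ih]

-- ===== VERDICT (by name: the statement is the Claim_ definition above) =====
theorem new_func_spec : Claim_equal_new_func := by
  intro a _
  unfold Spec_new_func new_func new_func_alt
  simpa using pv_key a []
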